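-- pv_equiv track=rewrite | github.com/KimGithub98/DENV_dimer_project | Sequence_motifs_and_interaction_matrices/Make_interaction_matrices.py | is_period
-- ===== SOURCE A (Python) =====
-- def is_period(hep_pos):
--     positions = ["a", "b", "c", "d", "e", "f", "g"]
--     i= 0
--     for pos in hep_pos:
--         if i == 0:
--             pos_num_theo = positions.index(pos)
--             pos_num_true = positions.index(pos)
--             period = (pos_num_theo == pos_num_true)
--         else:
--             pos_num_true = positions.index(pos)
--             period = (pos_num_theo == pos_num_true)
--         if pos == "g":
--             pos_num_theo = 0
--         else:
--             pos_num_theo += 1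
--         i += 1
--         if period is False:
--             return False
--     return True
-- ===== SOURCE B (Python) =====
-- def is_period(hep_pos):
--     positions = ["a", "b", "c", "d", "e", "f", "g"]
--     if not hep_pos:
--         return True
--     first = positions.index(hep_pos[0])
--     for k, pos in enumerate(hep_pos):
--         if positions.index(pos) != (first + k) % 7:
--             return False
--     return True
-- ===== Notes on version B (the rewrite author's own statement) =====
-- stated objective: simpler
-- what changed: Replaces A's stateful running counter with its special 'g'-reset branch and first-iteration flag by a closed-form expected position (first + k) % 7 checked per element.
import Mathlib
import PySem

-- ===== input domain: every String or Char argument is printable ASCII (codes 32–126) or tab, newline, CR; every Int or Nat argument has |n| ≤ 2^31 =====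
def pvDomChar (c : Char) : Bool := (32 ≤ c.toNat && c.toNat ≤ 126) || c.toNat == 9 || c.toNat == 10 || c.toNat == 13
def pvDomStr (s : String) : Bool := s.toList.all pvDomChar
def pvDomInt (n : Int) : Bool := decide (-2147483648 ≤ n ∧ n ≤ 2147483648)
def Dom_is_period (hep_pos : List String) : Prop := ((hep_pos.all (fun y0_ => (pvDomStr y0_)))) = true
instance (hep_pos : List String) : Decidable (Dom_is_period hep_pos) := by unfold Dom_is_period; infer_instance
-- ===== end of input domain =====

-- B replaces A's stateful heptad counter (with its 'g'-reset branch) by the closed form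
-- (first + k) % 7 for the expected position: simpler decomposition, same O(n) cost.


-- ===== PORT A =====
-- positions = ["a","b","c","d","e","f","g"]
def pvLetters : List String := ["a", "b", "c", "d", "e", "f", "g"]

-- A's loop after the first iteration: state pos_num_theo (always a Nat in A: it is only
-- ever an index 0..6 or an increment of one). positions.index raising ValueError is the
-- `none` branch (excluded by Pre_).
def is_period_loopA (theo : Nat) : List String → Bool
  | [] => true
  | pos :: rest =>
    match PySem.List.index? pvLetters pos with
    | none => false                      -- ValueError: outside Pre_
    | some t =>
      let period := theo == t
      let theo' := if pos == "g" then 0 else theo + 1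
      if period == false then false else is_period_loopA theo' rest

def is_period (hep_pos : List String) : Bool :=
  match hep_pos with
  | [] => true
  | pos :: rest =>
    -- i == 0 branch: pos_num_theo = pos_num_true = index(pos), period is trivially true
    match PySem.List.index? pvLetters pos with
    | none => false                      -- ValueError: outside Pre_
    | some t => is_period_loopA (if pos == "g" then 0 else t + 1) rest

-- ===== PORT B =====
def is_period_alt_loop (first : Nat) (k : Nat) : List String → Bool
  | [] => true
  | pos :: rest =>
    match PySem.List.index? pvLetters pos with
    | none => false                      -- ValueError: outside Pre_
    | some t => if t != (first + k) % 7 then false else is_period_alt_loop first (k + 1) rest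

def is_period_alt (hep_pos : List String) : Bool :=
  match hep_pos with
  | [] => true
  | h :: _ =>
    match PySem.List.index? pvLetters h with
    | none => false                      -- ValueError: outside Pre_
    | some first => is_period_alt_loop first 0 hep_pos

-- ===== PRECONDITION & SPEC =====
-- Pre_ excludes exactly the inputs on which A raises ValueError: those containing a
-- character outside a–g at a position A visits (i.e. before any periodicity break).
def Pre_is_period (hep_pos : List String) : Prop :=
  ∀ k < hep_pos.length,
    (∀ j < k, hep_pos.getD j "" =
        pvLetters.getD ((pvLetters.idxOf (hep_pos.getD 0 "") + j) % 7) "") →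
    (hep_pos.getD k "") ∈ pvLetters
instance (hep_pos : List String) : Decidable (Pre_is_period hep_pos) := by
  unfold Pre_is_period; infer_instance
def pvWitness_is_period : List String := ["f", "g", "a", "b"]

def Spec_is_period (hep_pos : List String) (out : Bool) : Prop := out = is_period_alt hep_pos
instance (hep_pos : List String) (out : Bool) : Decidable (Spec_is_period hep_pos out) := by unfold Spec_is_period; infer_instance

-- ===== CLAIM (what is proved, stated in full; the proofs are below) =====
def Claim_equal_is_period : Prop := ∀ (hep_pos : List String), Dom_is_period hep_pos → Pre_is_period hep_pos → Spec_is_period hep_pos (is_period hep_pos)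

-- ===== LEMMAS AND PROOFS =====

-- A valid letter's index is < 7, and the letter is "g" exactly when the index is 6.
theorem pv_index_facts (pos : String) (t : Nat)
    (h : PySem.List.index? pvLetters pos = some t) : t < 7 ∧ (pos = "g" ↔ t = 6) := by
  obtain ⟨hk, hget, -⟩ := PySem.List.getElem_of_index?_eq_some h
  simp [pvLetters] at hk
  refine ⟨hk, ?_⟩
  interval_cases t <;> simp [pvLetters] at hget <;> simp [← hget]

theorem pv_loop_eq (rest : List String) : ∀ (first k : Nat), first < 7 →
    is_period_loopA ((first + k) % 7) rest = is_period_alt_loop first k rest := by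
  induction rest with
  | nil => intro first k _; rfl
  | cons pos rest ih =>
    intro first k hf
    simp only [is_period_loopA, is_period_alt_loop]
    cases hidx : PySem.List.index? pvLetters pos with
    | none => rfl
    | some t =>
      obtain ⟨ht7, hg⟩ := pv_index_facts pos t hidx
      by_cases heq : t = (first + k) % 7
      · have hper : (((first + k) % 7 == t) == false) = false := by simp [heq]
        have hb : (t != (first + k) % 7) = false := by simp [heq]
        simp only [hper, hb, Bool.false_eq_true, if_false]
        by_cases hgp : pos = "g"
        · have h6 : t = 6 := hg.mp hgp
          have hmod : (first + (k + 1)) % 7 = 0 := by omega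
          have he : (if pos == "g" then 0 else (first + k) % 7 + 1) = (first + (k + 1)) % 7 := by
            simp [hgp, hmod]
          rw [he]; exact ih first (k + 1) hf
        · have ht6 : t ≠ 6 := fun h => hgp (hg.mpr h)
          have hmod : (first + (k + 1)) % 7 = (first + k) % 7 + 1 := by omega
          have he : (if pos == "g" then 0 else (first + k) % 7 + 1) = (first + (k + 1)) % 7 := by
            simp [hgp, hmod]
          rw [he]; exact ih first (k + 1) hf
      · have hper : (((first + k) % 7 == t) == false) = true := by
          simp [Ne.symm heq]
        have hb : (t != (first + k) % 7) = true := by simp [heq]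
        simp [hper, hb]

-- ===== VERDICT (by name: the statement is the Claim_ definition above) =====
theorem is_period_spec : Claim_equal_is_period := by
  intro hep_pos _dom _pre
  unfold Spec_is_period
  cases hep_pos with
  | nil => rfl
  | cons h rest =>
    simp only [is_period, is_period_alt]
    cases hidx : PySem.List.index? pvLetters h with
    | none => rfl
    | some first =>
      obtain ⟨hf7, hg⟩ := pv_index_facts h first hidx
      simp only [is_period_alt_loop, hidx]
      have h0 : (first != (first + 0) % 7) = false := by
        have hm : first % 7 = first := Nat.mod_eq_of_lt hf7
        simp [hm]
      simp only [h0, Bool.false_eq_true, if_false]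
      by_cases hgp : h = "g"
      · have h6 : first = 6 := hg.mp hgp
        have hmod : (first + 1) % 7 = 0 := by omega
        have : (if h == "g" then 0 else first + 1) = (first + 1) % 7 := by
          simp [hgp, hmod]
        rw [this]; exact pv_loop_eq rest first 1 hf7
      · have hmod : (first + 1) % 7 = first + 1 := by
          have : first ≠ 6 := fun h6 => hgp (hg.mpr h6); omega
        have : (if h == "g" then 0 else first + 1) = (first + 1) % 7 := by
          simp [hgp, hmod]
        rw [this]; exact pv_loop_eq rest first 1 hf7
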